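-- pv_equiv track=rewrite | github.com/SonicCodes/integrated_dit | dt.py | get_block_info
-- ===== SOURCE A (Python) =====
-- def get_block_info(layer_idx, projection_ratios, direction='down'):
--     cumsum = 0
--     cumulative_ratios = 1
--     for ratio, num_pairs in projection_ratios:
--         if layer_idx < cumsum + num_pairs:
--             # For down blocks: True if last layer in block
--             # For up blocks: True if first layer in block
--             is_resample_layer = (direction == 'down' and layer_idx == cumsum + num_pairs - 1) or \
--                               (direction == 'up' and layer_idx == cumsum)
--             cumulative_ratios *= ratio
--             return ratio, is_resample_layer
--         cumsum += num_pairs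
--     return 1, False
-- ===== SOURCE B (Python) =====
-- def get_block_info(layer_idx, projection_ratios, direction='down'):
--     # cumulative block boundaries, then binary search for the containing block
--     bounds = []
--     total = 0
--     for _, num_pairs in projection_ratios:
--         total += num_pairs
--         bounds.append(total)
--     lo, hi = 0, len(bounds)
--     while lo < hi:
--         mid = (lo + hi) // 2
--         if layer_idx < bounds[mid]:
--             hi = mid
--         else:
--             lo = mid + 1
--     if lo == len(bounds):
--         return 1, False
--     ratio = projection_ratios[lo][0]
--     start = bounds[lo - 1] if lo > 0 else 0
--     is_resample_layer = (direction == 'down' and layer_idx == bounds[lo] - 1) or \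
--                         (direction == 'up' and layer_idx == start)
--     return ratio, is_resample_layer
-- ===== Notes on version B (the rewrite author's own statement) =====
-- stated objective: alternative
-- what changed: B precomputes the cumulative block-boundary array once and locates the containing block with a binary search plus index arithmetic, instead of A's fused linear scan with a running cumsum and early return; Pre_ requires nonnegative num_pairs (block sizes), since on negative counts the boundary array is not monotone and binary search is not meaningful.
-- outside the precondition, e.g. on get_block_info(4, [(2, 5), (3, -2)], 'down'): A returns (2, True), B returns (1, False)
import Mathlib
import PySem

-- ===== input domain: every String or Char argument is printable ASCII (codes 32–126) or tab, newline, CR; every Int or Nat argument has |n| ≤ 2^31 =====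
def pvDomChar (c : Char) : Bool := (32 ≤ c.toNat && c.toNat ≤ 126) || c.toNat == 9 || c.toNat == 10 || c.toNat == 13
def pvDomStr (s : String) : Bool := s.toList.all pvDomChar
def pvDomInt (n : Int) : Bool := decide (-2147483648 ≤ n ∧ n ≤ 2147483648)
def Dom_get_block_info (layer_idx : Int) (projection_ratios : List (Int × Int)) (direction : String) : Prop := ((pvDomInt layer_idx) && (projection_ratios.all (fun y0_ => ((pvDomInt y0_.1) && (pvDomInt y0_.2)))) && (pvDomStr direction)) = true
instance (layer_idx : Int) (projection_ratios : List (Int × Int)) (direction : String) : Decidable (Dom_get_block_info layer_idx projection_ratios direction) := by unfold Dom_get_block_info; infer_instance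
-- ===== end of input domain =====

-- B builds the cumulative boundary array once and binary-searches it for the containing
-- block (alternative decomposition; A is a fused linear scan with early return).

-- ===== PORT A =====
-- A's loop: cumsum accumulator, early return on the first matching block
-- (cumulative_ratios is carried like in A; it never affects the returned value)
def pvGoA (layer_idx : Int) (direction : String) :
    List (Int × Int) → Int → Int → Int × Bool
  | [], _, _ => (1, false)
  | (ratio, num_pairs) :: rest, cumsum, cumulative_ratios =>
    if layer_idx < cumsum + num_pairs then
      let is_resample_layer :=
        (direction == "down" && (layer_idx == cumsum + num_pairs - 1)) ||
        (direction == "up" && (layer_idx == cumsum))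
      let _cumulative_ratios := cumulative_ratios * ratio
      (ratio, is_resample_layer)
    else
      pvGoA layer_idx direction rest (cumsum + num_pairs) cumulative_ratios

def get_block_info (layer_idx : Int) (projection_ratios : List (Int × Int)) (direction : String) : Int × Bool :=
  pvGoA layer_idx direction projection_ratios 0 1

-- ===== PORT B =====
-- Source B's bounds loop: running total, append total after each block
def pvBounds : List (Int × Int) → Int → List Int
  | [], _ => []
  | p :: bs, total => (total + p.2) :: pvBounds bs (total + p.2)

-- Source B's while loop: binary search, first index whose boundary exceeds x
def pvBisect (a : List Int) (x : Int) (lo hi : Nat) : Nat :=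
  if _h : lo < hi then
    let mid := (lo + hi) / 2
    if x < a.getD mid 0 then pvBisect a x lo mid
    else pvBisect a x (mid + 1) hi
  else lo
termination_by hi - lo
decreasing_by all_goals omega

def get_block_info_alt (layer_idx : Int) (projection_ratios : List (Int × Int)) (direction : String) : Int × Bool :=
  let bounds := pvBounds projection_ratios 0
  let lo := pvBisect bounds layer_idx 0 bounds.length
  if lo = bounds.length then (1, false)
  else
    let ratio := (projection_ratios.getD lo ((0 : Int), (0 : Int))).1
    let start := if 0 < lo then bounds.getD (lo - 1) 0 else 0
    (ratio,
      (direction == "down" && (layer_idx == bounds.getD lo 0 - 1)) ||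
      (direction == "up" && (layer_idx == start)))

-- ===== PRECONDITION & SPEC =====
-- Pre_ restricts to the natural domain: num_pairs is a count of layers in a block, so it must
-- be nonnegative; on negative counts the boundary array is not monotone and A's scan is accidental.
def Pre_get_block_info (layer_idx : Int) (projection_ratios : List (Int × Int)) (direction : String) : Prop :=
  ∀ p ∈ projection_ratios, 0 ≤ p.2
instance (layer_idx : Int) (projection_ratios : List (Int × Int)) (direction : String) : Decidable (Pre_get_block_info layer_idx projection_ratios direction) := by unfold Pre_get_block_info; infer_instance

def pvWitness_get_block_info : Int × (List (Int × Int)) × String := (1, [(2, 1), (3, 2)], "down")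

def Spec_get_block_info (layer_idx : Int) (projection_ratios : List (Int × Int)) (direction : String) (out : Int × Bool) : Prop := out = get_block_info_alt layer_idx projection_ratios direction
instance (layer_idx : Int) (projection_ratios : List (Int × Int)) (direction : String) (out : Int × Bool) : Decidable (Spec_get_block_info layer_idx projection_ratios direction out) := by unfold Spec_get_block_info; infer_instance

-- ===== CLAIM (what is proved, stated in full; the proofs are below) =====
def Claim_equal_get_block_info : Prop := ∀ (layer_idx : Int) (projection_ratios : List (Int × Int)) (direction : String), Dom_get_block_info layer_idx projection_ratios direction → Pre_get_block_info layer_idx projection_ratios direction → Spec_get_block_info layer_idx projection_ratios direction (get_block_info layer_idx projection_ratios direction)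

-- ===== LEMMAS AND PROOFS =====

theorem pvBounds_length (bs : List (Int × Int)) (c : Int) :
    (pvBounds bs c).length = bs.length := by
  induction bs generalizing c with
  | nil => rfl
  | cons p bs ih => simp [pvBounds, ih]

/-- lower bound: every boundary is at least the starting total (nonneg block sizes) -/
theorem pvBounds_lb (bs : List (Int × Int)) (c : Int) (h : ∀ p ∈ bs, 0 ≤ p.2) :
    ∀ k, k < bs.length → c ≤ (pvBounds bs c).getD k 0 := by
  induction bs generalizing c with
  | nil => intro k hk; simp at hk
  | cons p bs ih =>
      intro k hk
      have hp : 0 ≤ p.2 := h p (by simp)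
      cases k with
      | zero => simp [pvBounds]; omega
      | succ k =>
          have := ih (c + p.2) (fun q hq => h q (by simp [hq])) k (by simpa using hk)
          simp only [pvBounds, List.getD_cons_succ]
          omega

theorem pvBounds_mono (bs : List (Int × Int)) (c : Int) (h : ∀ p ∈ bs, 0 ≤ p.2) :
    ∀ i j, i ≤ j → j < bs.length →
      (pvBounds bs c).getD i 0 ≤ (pvBounds bs c).getD j 0 := by
  induction bs generalizing c with
  | nil => intro i j _ hj; simp at hj
  | cons p bs ih =>
      intro i j hij hj
      cases i with
      | zero =>
          cases j with
          | zero => exact le_refl _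
          | succ j =>
              have := pvBounds_lb bs (c + p.2) (fun q hq => h q (by simp [hq])) j (by simpa using hj)
              simp only [pvBounds, List.getD_cons_zero, List.getD_cons_succ]
              omega
      | succ i =>
          cases j with
          | zero => omega
          | succ j =>
              have := ih (c + p.2) (fun q hq => h q (by simp [hq])) i j (by omega) (by simpa using hj)
              simpa [pvBounds] using this

/-- binary-search invariant: the result splits the array at the first boundary exceeding x -/
theorem pvBisect_spec (a : List Int) (x : Int)
    (mono : ∀ i j, i ≤ j → j < a.length → a.getD i 0 ≤ a.getD j 0) :
    ∀ n lo hi, hi - lo ≤ n → lo ≤ hi → hi ≤ a.length →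
      (∀ i, i < lo → a.getD i 0 ≤ x) →
      (∀ i, hi ≤ i → i < a.length → x < a.getD i 0) →
      pvBisect a x lo hi ≤ a.length ∧
      (∀ i, i < pvBisect a x lo hi → a.getD i 0 ≤ x) ∧
      (∀ i, pvBisect a x lo hi ≤ i → i < a.length → x < a.getD i 0) := by
  intro n
  induction n with
  | zero =>
      intro lo hi hn hlo hhi Hlo Hhi
      have : lo = hi := by omega
      subst this
      rw [pvBisect]
      simp only [lt_irrefl, dite_false]
      exact ⟨by omega, Hlo, Hhi⟩
  | succ n ih =>
      intro lo hi hn hlo hhi Hlo Hhi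
      rw [pvBisect]
      by_cases h : lo < hi
      · simp only [h, dite_true]
        by_cases hx : x < a.getD ((lo + hi) / 2) 0
        · simp only [hx, if_true]
          refine ih lo ((lo + hi) / 2) (by omega) (by omega) (by omega) Hlo ?_
          intro i hi1 hi2
          exact lt_of_lt_of_le hx (mono _ _ hi1 hi2)
        · simp only [hx, if_false]
          refine ih ((lo + hi) / 2 + 1) hi (by omega) (by omega) hhi ?_ Hhi
          intro i hi1
          have hmid : (lo + hi) / 2 < a.length := by omega
          exact le_trans (mono i ((lo + hi) / 2) (by omega) hmid) (by omega)
      · simp only [h, dite_false]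
        have : lo = hi := by omega
        subst this
        exact ⟨by omega, Hlo, Hhi⟩

/-- first index with x < a[i] (a.length if none) -/
def firstHit (x : Int) : List Int → Nat
  | [] => 0
  | b :: bs => if x < b then 0 else firstHit x bs + 1

theorem firstHit_eq (x : Int) (a : List Int) :
    ∀ r, r ≤ a.length →
      (∀ i, i < r → a.getD i 0 ≤ x) →
      (∀ i, r ≤ i → i < a.length → x < a.getD i 0) →
      firstHit x a = r := by
  induction a with
  | nil => intro r hr _ _; simp at hr; simp [firstHit, hr]
  | cons b as ih =>
      intro r hr h1 h2
      by_cases hx : x < b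
      · have hr0 : r = 0 := by
          by_contra h
          have := h1 0 (by omega)
          simp at this; omega
        simp [firstHit, hx, hr0]
      · have hr0 : r ≠ 0 := by
          intro h
          have := h2 0 (by omega) (by simp)
          simp at this; omega
        obtain ⟨r', rfl⟩ := Nat.exists_eq_succ_of_ne_zero hr0
        simp only [firstHit, hx, if_false]
        have := ih r' (by simpa using hr)
          (fun i hi => by simpa using h1 (i + 1) (by omega))
          (fun i hi1 hi2 => by simpa using h2 (i + 1) (by omega) (by simpa using hi2))
        omega

/-- A's scan computed from the boundary array via the first hit index -/
theorem goA_eq (x : Int) (dir : String) (bs : List (Int × Int)) (c cr : Int) :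
    pvGoA x dir bs c cr =
      (if firstHit x (pvBounds bs c) = bs.length then ((1 : Int), false)
       else ((bs.getD (firstHit x (pvBounds bs c)) ((0 : Int), (0 : Int))).1,
         (dir == "down" && (x == (pvBounds bs c).getD (firstHit x (pvBounds bs c)) 0 - 1)) ||
         (dir == "up" && (x == if 0 < firstHit x (pvBounds bs c) then
            (pvBounds bs c).getD (firstHit x (pvBounds bs c) - 1) 0 else c)))) := by
  induction bs generalizing c cr with
  | nil => simp [pvGoA, pvBounds, firstHit]
  | cons p rest ih =>
      obtain ⟨ratio, np⟩ := p
      simp only [pvBounds, firstHit, pvGoA]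
      by_cases hx : x < c + np
      · simp [hx]
      · simp only [hx, if_false]
        rw [ih (c + np) cr]
        cases hf : firstHit x (pvBounds rest (c + np)) with
        | zero => cases rest with
            | nil => simp
            | cons q qs => simp
        | succ f => by_cases hfl : f + 1 = rest.length <;> simp [hfl]

-- ===== VERDICT (by name: the statement is the Claim_ definition above) =====
theorem get_block_info_spec : Claim_equal_get_block_info := by
  intro x prs dir _ hpre
  unfold Spec_get_block_info get_block_info get_block_info_alt
  rw [goA_eq]
  have hlen := pvBounds_length prs 0
  have hmono : ∀ i j, i ≤ j → j < (pvBounds prs 0).length →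
      (pvBounds prs 0).getD i 0 ≤ (pvBounds prs 0).getD j 0 := by
    intro i j hij hj
    exact pvBounds_mono prs 0 hpre i j hij (by omega)
  have hspec := pvBisect_spec (pvBounds prs 0) x hmono
      ((pvBounds prs 0).length) 0 ((pvBounds prs 0).length)
      (by omega) (by omega) (by omega)
      (by intro i hi; omega) (by intro i hi1 hi2; omega)
  have hfh : firstHit x (pvBounds prs 0) =
      pvBisect (pvBounds prs 0) x 0 (pvBounds prs 0).length :=
    firstHit_eq x (pvBounds prs 0) _ hspec.1 hspec.2.1 hspec.2.2
  simp only [hfh, hlen]
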